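-- pv_equiv track=rewrite | github.com/GHFredrik/Lab | uke_09/uke_09_oppg_8.py | word_comparison
-- ===== SOURCE A (Python) =====
-- def word_comparison(w1, w2):
--     my_dict = {}
--     common = []
--     w1_unique = []
--     w2_unique = []
--
--     for chr in w1:
--         if chr in w2: #Common
--             common.append(chr)
--         else: #Unique to w1
--             w1_unique.append(chr)
--
--     for chr in w2: #Unique to w2
--         if chr not in w1:
--             w2_unique.append(chr)
--
--     my_dict["In common"] = set(common)
--     my_dict["Unique to first word"] = set(w1_unique)
--     my_dict["Unique to second word"] = set(w2_unique)
--
--     return my_dict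
-- ===== SOURCE B (Python) =====
-- def word_comparison(w1, w2):
--     # Build a presence-bitmask index in one linear pass per word (bit 1 = occurs in
--     # w1, bit 2 = occurs in w2), then read the three buckets straight off the index:
--     # no membership test against either word is ever performed.
--     mask = {}
--     for c in w1:
--         mask[c] = mask.get(c, 0) | 1
--     for c in w2:
--         mask[c] = mask.get(c, 0) | 2
--     return {"In common": {c for c, m in mask.items() if m == 3},
--             "Unique to first word": {c for c, m in mask.items() if m == 1},
--             "Unique to second word": {c for c, m in mask.items() if m == 2}}
-- ===== Notes on version B (the rewrite author's own statement) =====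
-- stated objective: alternative
-- what changed: A classifies every character by membership scans of the other word (two passes with an inner 'in' scan each); B never tests membership in a word: it builds one dict mapping each character to a presence bitmask (bit 1 = in w1, bit 2 = in w2) in a single linear pass per word, then reads the three buckets straight off the index values.
import Mathlib
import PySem

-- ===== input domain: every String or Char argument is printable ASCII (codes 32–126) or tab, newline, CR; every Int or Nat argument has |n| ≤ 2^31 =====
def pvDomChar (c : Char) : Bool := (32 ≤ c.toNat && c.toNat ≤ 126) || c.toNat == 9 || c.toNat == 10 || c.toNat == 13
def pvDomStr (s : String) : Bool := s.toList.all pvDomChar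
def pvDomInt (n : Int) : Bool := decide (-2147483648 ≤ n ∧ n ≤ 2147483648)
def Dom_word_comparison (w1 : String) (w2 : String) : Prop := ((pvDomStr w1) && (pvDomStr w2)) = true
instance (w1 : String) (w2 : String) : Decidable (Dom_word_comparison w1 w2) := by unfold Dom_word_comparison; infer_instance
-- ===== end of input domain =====

-- B replaces A's per-character membership scans by a presence-bitmask index (one dict built
-- in a single linear pass per word, buckets read off the index values) — objective: alternative algorithm.


-- ===== PORT A =====
-- 'chr in w2' on a single character is exactly character membership: ported as List.contains on toList.
def word_comparison (w1 : String) (w2 : String) : List (String × List String) :=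
  -- first loop: one pass over w1 building (common, w1_unique) together
  let p := w1.toList.foldl
    (fun (p : List Char × List Char) c =>
      if w2.toList.contains c then (p.1 ++ [c], p.2) else (p.1, p.2 ++ [c]))
    ([], [])
  let common := p.1
  let w1_unique := p.2
  -- second loop: pass over w2 collecting characters not in w1
  let w2_unique := w2.toList.foldl
    (fun acc c => if !(w1.toList.contains c) then acc ++ [c] else acc) []
  [("In common", (PySem.Set.ofList common).map (fun c => String.singleton c)),
   ("Unique to first word", (PySem.Set.ofList w1_unique).map (fun c => String.singleton c)),
   ("Unique to second word", (PySem.Set.ofList w2_unique).map (fun c => String.singleton c))]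

-- ===== PORT B =====
-- mask.get(c, 0) | k is Dict.getD + PySem.Int.bor; the three set comprehensions over
-- mask.items() are Set.ofList of the filtered-and-projected items list.
def word_comparison_alt (w1 : String) (w2 : String) : List (String × List String) :=
  let m1 := w1.toList.foldl
    (fun d c => d.insert c (PySem.Int.bor (d.getD c 0) 1)) (PySem.Dict.empty : PySem.Dict Char Int)
  let m2 := w2.toList.foldl
    (fun d c => d.insert c (PySem.Int.bor (d.getD c 0) 2)) m1
  let its := m2.items
  [("In common",
      (PySem.Set.ofList ((its.filter (fun p => p.2 == 3)).map (fun p => p.1))).map (fun c => String.singleton c)),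
   ("Unique to first word",
      (PySem.Set.ofList ((its.filter (fun p => p.2 == 1)).map (fun p => p.1))).map (fun c => String.singleton c)),
   ("Unique to second word",
      (PySem.Set.ofList ((its.filter (fun p => p.2 == 2)).map (fun p => p.1))).map (fun c => String.singleton c))]

-- ===== PRECONDITION & SPEC =====
def Spec_word_comparison (w1 : String) (w2 : String) (out : List (String × List String)) : Prop := out = word_comparison_alt w1 w2
instance (w1 : String) (w2 : String) (out : List (String × List String)) : Decidable (Spec_word_comparison w1 w2 out) := by unfold Spec_word_comparison; infer_instance

-- ===== CLAIM (what is proved, stated in full; the proofs are below) =====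
def Claim_equal_word_comparison : Prop := ∀ (w1 : String) (w2 : String), Dom_word_comparison w1 w2 → Spec_word_comparison w1 w2 (word_comparison w1 w2)

-- ===== LEMMAS AND PROOFS =====

-- A's first loop: the pair accumulator splits w1 into (filter p, filter !p).
lemma pvFold2 (p : Char → Bool) : ∀ (l a b : List Char),
    l.foldl (fun (t : List Char × List Char) c =>
      if p c then (t.1 ++ [c], t.2) else (t.1, t.2 ++ [c])) (a, b)
    = (a ++ l.filter p, b ++ l.filter (fun c => !p c)) := by
  intro l
  induction l with
  | nil => simp
  | cons x xs ih =>
    intro a b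
    by_cases hx : p x <;> simp [List.foldl_cons, hx, ih]

-- PySem.Set.add commutes with filter.
lemma pvAdd_filter (p : Char → Bool) (s : List Char) (x : Char) :
    (PySem.Set.add s x).filter p
      = (if p x then PySem.Set.add (s.filter p) x else s.filter p) := by
  by_cases hm : x ∈ s <;> by_cases hp : p x <;>
    simp [PySem.Set.add, hm, hp, List.mem_filter]

-- foldl of Set.add commutes with filter.
lemma pvFoldl_add_filter (p : Char → Bool) : ∀ (l acc : List Char),
    (l.foldl PySem.Set.add acc).filter p
      = (l.filter p).foldl PySem.Set.add (acc.filter p) := by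
  intro l
  induction l with
  | nil => simp
  | cons x xs ih =>
    intro acc
    by_cases hp : p x <;>
      simp [List.foldl_cons, ih, pvAdd_filter, hp]

-- set(filter) = filter(set): building the set of a filtered word filters the word's set.
lemma pvOfList_filter (p : Char → Bool) (l : List Char) :
    PySem.Set.ofList (l.filter p) = (PySem.Set.ofList l).filter p := by
  rw [PySem.Set.ofList_eq_foldl, PySem.Set.ofList_eq_foldl, pvFoldl_add_filter]
  rfl

-- membership of a key in a pair-map dict literal
lemma pvContains_mk (L : List (Char × Int)) (c : Char) :
    (PySem.Dict.mk L).contains c = L.any (fun p => p.1 == c) := by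
  have h := PySem.Dict.contains_eq_isSome_get? (PySem.Dict.mk L) c
  simp only [PySem.Dict.get?] at h
  rw [h, Option.isSome_map, List.isSome_find?]

-- getD on a dict literal whose every entry's value is f of its key
lemma pvGetD_mk (f : Char → Int) : ∀ (L : List (Char × Int)), (∀ p ∈ L, p.2 = f p.1) →
    ∀ (c : Char), c ∈ L.map (fun p => p.1) → (PySem.Dict.mk L).getD c 0 = f c := by
  intro L
  induction L with
  | nil => simp
  | cons q qs ih =>
    obtain ⟨k, v⟩ := q
    intro hf c hc
    by_cases hk : k = c
    · have hv : v = f c := by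
        have := hf (k, v) (by simp)
        simpa [hk] using this
      simp [PySem.Dict.getD, PySem.Dict.get?_mk_cons, hk, hv]
    · have hc' : c ∈ qs.map (fun p => p.1) := by
        simp only [List.map_cons, List.mem_cons] at hc
        rcases hc with h | h
        · exact absurd h.symm hk
        · exact h
      have hrec := ih (fun p hp => hf p (List.mem_cons_of_mem _ hp)) c hc'
      have hne : (k == c) = false := by simpa using hk
      simpa [PySem.Dict.getD, PySem.Dict.get?_mk_cons, hne] using hrec

-- key membership in the two-block pair-list dicts the ports build
lemma pvContains_pairs (s t : List Char) (g₁ g₂ : Char → Int) (c : Char) :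
    (PySem.Dict.mk (s.map (fun x => (x, g₁ x)) ++ t.map (fun x => (x, g₂ x)))).contains c
      = (decide (c ∈ s) || decide (c ∈ t)) := by
  rw [pvContains_mk, Bool.eq_iff_iff]
  simp only [List.any_eq_true, List.mem_append, List.mem_map, Bool.or_eq_true,
    decide_eq_true_eq, beq_iff_eq]
  constructor
  · rintro ⟨p, hp | hp, hpc⟩ <;> obtain ⟨y, hy, rfl⟩ := hp
    · exact Or.inl (hpc ▸ hy)
    · exact Or.inr (hpc ▸ hy)
  · rintro (hm | hm)
    · exact ⟨(c, g₁ c), Or.inl ⟨c, hm, rfl⟩, rfl⟩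
    · exact ⟨(c, g₂ c), Or.inr ⟨c, hm, rfl⟩, rfl⟩

lemma pvContains_map (s : List Char) (g : Char → Int) (c : Char) :
    (PySem.Dict.mk (s.map (fun x => (x, g x)))).contains c = decide (c ∈ s) := by
  have := pvContains_pairs s [] g g c
  simpa using this

lemma pvKeys_pairs (s t : List Char) (g₁ g₂ : Char → Int) :
    (s.map (fun x => (x, g₁ x)) ++ t.map (fun x => (x, g₂ x))).map (fun p => p.1) = s ++ t := by
  simp [List.map_map, Function.comp_def]

-- replacing the entry at key c in a map-built pair list rewrites it pointwise
lemma pvReplace_map (s : List Char) (g : Char → Int) (c : Char) (v : Int) :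
    (s.map (fun x => (x, g x))).map (fun p => if p.1 == c then (c, v) else p)
      = s.map (fun x => (x, if x = c then v else g x)) := by
  rw [List.map_map]
  refine List.map_congr_left ?_
  intro x _
  by_cases hx : x = c <;> simp [hx]

-- a pair list whose keys avoid c is untouched by the replacement map
lemma pvReplace_id (t : List Char) (f : Char → Int) (v : Int) (c : Char) (hc : c ∉ t) :
    (t.map (fun x => (x, f x))).map (fun p => if p.1 == c then (c, v) else p)
      = t.map (fun x => (x, f x)) := by
  rw [List.map_map]
  refine List.map_congr_left ?_
  intro x hx
  have : x ≠ c := fun h => hc (h ▸ hx)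
  simp [this]

-- B's first loop: building the bit-1 index over w1 is ordered dedup with constant value 1.
lemma pvFoldB1 : ∀ (l s : List Char),
    l.foldl (fun d c => d.insert c (PySem.Int.bor (d.getD c 0) 1))
      (PySem.Dict.mk (s.map (fun c => (c, (1 : Int)))))
    = PySem.Dict.mk ((l.foldl PySem.Set.add s).map (fun c => (c, (1 : Int)))) := by
  intro l
  induction l with
  | nil => intro s; rfl
  | cons x xs ih =>
    intro s
    rw [List.foldl_cons, List.foldl_cons]
    by_cases hx : x ∈ s
    · have hcont : (PySem.Dict.mk (s.map (fun c => (c, (1 : Int))))).contains x = true := by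
        rw [pvContains_map]; simpa using hx
      have hget : (PySem.Dict.mk (s.map (fun c => (c, (1 : Int))))).getD x 0 = 1 := by
        refine pvGetD_mk (fun _ => 1) _ (by simp) x (by simp [List.map_map, Function.comp_def]; exact hx)
      have hins : (PySem.Dict.mk (s.map (fun c => (c, (1 : Int))))).insert x 1
          = PySem.Dict.mk (s.map (fun c => (c, (1 : Int)))) := by
        apply PySem.Dict.ext
        rw [PySem.Dict.items_insert_of_contains _ _ hcont]
        rw [pvReplace_map]
        refine List.map_congr_left ?_
        intro y _
        by_cases hy : y = x <;> simp [hy]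
      rw [hget, show PySem.Int.bor 1 1 = 1 from rfl, hins, ih,
        PySem.Set.add_of_mem hx]
    · have hcont : (PySem.Dict.mk (s.map (fun c => (c, (1 : Int))))).contains x = false := by
        rw [pvContains_map]; simpa using hx
      have hget : (PySem.Dict.mk (s.map (fun c => (c, (1 : Int))))).getD x 0 = 0 :=
        PySem.Dict.getD_of_not_contains _ _ hcont
      have hins : (PySem.Dict.mk (s.map (fun c => (c, (1 : Int))))).insert x 1
          = PySem.Dict.mk ((s ++ [x]).map (fun c => (c, (1 : Int)))) := by
        apply PySem.Dict.ext
        rw [PySem.Dict.items_insert_of_not_contains _ _ hcont]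
        simp
      rw [hget, show PySem.Int.bor 0 1 = 1 from rfl, hins, ih,
        PySem.Set.add_of_not_mem hx]

-- B's second loop over w2: upgrades w1-keys it meets to bit 3 and appends fresh keys with bit 2.
lemma pvFoldB2 (s : List Char) : ∀ (l : List Char) (t : List Char) (g : Char → Int),
    (∀ c ∈ t, c ∉ s) → (∀ c ∈ s, g c = 1 ∨ g c = 3) →
    l.foldl (fun d c => d.insert c (PySem.Int.bor (d.getD c 0) 2))
      (PySem.Dict.mk (s.map (fun c => (c, g c)) ++ t.map (fun c => (c, (2 : Int)))))
    = PySem.Dict.mk (s.map (fun c => (c, if l.contains c then 3 else g c))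
        ++ (l.foldl (fun acc c => if s.contains c then acc else PySem.Set.add acc c) t).map
             (fun c => (c, (2 : Int)))) := by
  intro l
  induction l with
  | nil => intro t g _ _; rfl
  | cons x xs ih =>
    intro t g hdisj hg
    have hf : ∀ p ∈ s.map (fun c => (c, g c)) ++ t.map (fun c => (c, (2 : Int))),
        p.2 = (fun c => if s.contains c then g c else 2) p.1 := by
      intro p hp
      rcases List.mem_append.mp hp with h | h
      · obtain ⟨y, hy, rfl⟩ := List.mem_map.mp h
        simp only [List.contains_iff_mem, hy, if_true]
      · obtain ⟨y, hy, rfl⟩ := List.mem_map.mp h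
        have hns : y ∉ s := hdisj y hy
        simp only [List.contains_iff_mem, hns, if_false]
    rw [List.foldl_cons, List.foldl_cons]
    by_cases hxs : x ∈ s
    · -- x is a w1-key: overwrite in place, value becomes 3
      have hxt : x ∉ t := fun h => hdisj x h hxs
      have hcont : (PySem.Dict.mk (s.map (fun c => (c, g c)) ++ t.map (fun c => (c, (2 : Int))))).contains x = true := by
        rw [pvContains_pairs]; simp [hxs]
      have hget : (PySem.Dict.mk (s.map (fun c => (c, g c)) ++ t.map (fun c => (c, (2 : Int))))).getD x 0 = g x := by
        have := pvGetD_mk (fun c => if s.contains c then g c else 2) _ hf x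
          (by rw [pvKeys_pairs]; exact List.mem_append_left _ hxs)
        simpa [List.contains_iff_mem, hxs] using this
      have hbor : PySem.Int.bor (g x) 2 = 3 := by
        rcases hg x hxs with h | h <;> rw [h] <;> rfl
      have hins : (PySem.Dict.mk (s.map (fun c => (c, g c)) ++ t.map (fun c => (c, (2 : Int))))).insert x 3
          = PySem.Dict.mk (s.map (fun c => (c, (fun y => if y = x then 3 else g y) c))
              ++ t.map (fun c => (c, (2 : Int)))) := by
        apply PySem.Dict.ext
        rw [PySem.Dict.items_insert_of_contains _ _ hcont]
        rw [List.map_append, pvReplace_map, pvReplace_id _ _ _ _ hxt]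
      have hg' : ∀ c ∈ s, (fun y => if y = x then 3 else g y) c = 1 ∨ (fun y => if y = x then 3 else g y) c = 3 := by
        intro c hc
        by_cases h : c = x
        · simp [h]
        · simpa [h] using hg c hc
      rw [hget, hbor, hins, ih t (fun y => if y = x then 3 else g y) hdisj hg']
      congr 1
      congr 1
      · refine List.map_congr_left ?_
        intro y _
        by_cases hyx : y = x
        · subst hyx
          simp
        · simp [hyx]
      · simp [hxs]
    · by_cases hxt : x ∈ t
      · -- x already a w2-only key: value stays 2, dict unchanged
        have hcont : (PySem.Dict.mk (s.map (fun c => (c, g c)) ++ t.map (fun c => (c, (2 : Int))))).contains x = true := by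
          rw [pvContains_pairs]; simp [hxt]
        have hget : (PySem.Dict.mk (s.map (fun c => (c, g c)) ++ t.map (fun c => (c, (2 : Int))))).getD x 0 = 2 := by
          have := pvGetD_mk (fun c => if s.contains c then g c else 2) _ hf x
            (by rw [pvKeys_pairs]; exact List.mem_append_right _ hxt)
          simpa [List.contains_iff_mem, hxs] using this
        have hins : (PySem.Dict.mk (s.map (fun c => (c, g c)) ++ t.map (fun c => (c, (2 : Int))))).insert x 2
            = PySem.Dict.mk (s.map (fun c => (c, g c)) ++ t.map (fun c => (c, (2 : Int)))) := by
          apply PySem.Dict.ext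
          rw [PySem.Dict.items_insert_of_contains _ _ hcont]
          rw [List.map_append, pvReplace_id _ _ _ _ hxs]
          congr 1
          rw [List.map_map]
          refine List.map_congr_left ?_
          intro y _
          by_cases hy : y = x <;> simp [hy]
        rw [hget, show PySem.Int.bor 2 2 = 2 from rfl, hins, ih t g hdisj hg]
        congr 1
        congr 1
        · refine List.map_congr_left ?_
          intro y hy
          have hyx : y ≠ x := fun h => hxs (h ▸ hy)
          simp [hyx]
        · simp [hxs, PySem.Set.add_of_mem hxt]
      · -- fresh key: appended with value 2
        have hcont : (PySem.Dict.mk (s.map (fun c => (c, g c)) ++ t.map (fun c => (c, (2 : Int))))).contains x = false := by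
          rw [pvContains_pairs]; simp [hxs, hxt]
        have hget : (PySem.Dict.mk (s.map (fun c => (c, g c)) ++ t.map (fun c => (c, (2 : Int))))).getD x 0 = 0 :=
          PySem.Dict.getD_of_not_contains _ _ hcont
        have hins : (PySem.Dict.mk (s.map (fun c => (c, g c)) ++ t.map (fun c => (c, (2 : Int))))).insert x 2
            = PySem.Dict.mk (s.map (fun c => (c, g c)) ++ (t ++ [x]).map (fun c => (c, (2 : Int)))) := by
          apply PySem.Dict.ext
          rw [PySem.Dict.items_insert_of_not_contains _ _ hcont]
          simp
        have hdisj' : ∀ c ∈ t ++ [x], c ∉ s := by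
          intro c hc
          rcases List.mem_append.mp hc with h | h
          · exact hdisj c h
          · rw [List.mem_singleton] at h; exact h ▸ hxs
        rw [hget, show PySem.Int.bor 0 2 = 2 from rfl, hins, ih (t ++ [x]) g hdisj' hg]
        congr 1
        congr 1
        · refine List.map_congr_left ?_
          intro y hy
          have hyx : y ≠ x := fun h => hxs (h ▸ hy)
          simp [hyx]
        · simp [hxs, PySem.Set.add_of_not_mem hxt]


-- the conditional-add accumulator is a fold of Set.add over the filtered list
lemma pvFoldAddIf (s : List Char) : ∀ (l t : List Char),
    l.foldl (fun acc c => if s.contains c then acc else PySem.Set.add acc c) t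
    = (l.filter (fun c => !s.contains c)).foldl PySem.Set.add t := by
  intro l
  induction l with
  | nil => intro t; rfl
  | cons x xs ih =>
    intro t
    rw [List.foldl_cons, List.filter_cons]
    cases hx : s.contains x
    · simp only [Bool.not_false, Bool.false_eq_true, if_true]
      rw [List.foldl_cons]
      exact ih (PySem.Set.add t x)
    · simp only [Bool.not_true, if_true]
      exact ih t

-- ===== VERDICT (by name: the statement is the Claim_ definition above) =====
theorem word_comparison_spec : Claim_equal_word_comparison := by
  intro w1 w2 _
  unfold Spec_word_comparison
  simp only [word_comparison, word_comparison_alt]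
  set L1 := w1.toList with hL1
  set L2 := w2.toList with hL2
  set S1 : List Char := PySem.Set.ofList L1 with hS1
  -- B's first loop
  have hm1 : L1.foldl (fun d c => d.insert c (PySem.Int.bor (d.getD c 0) 1))
      (PySem.Dict.empty : PySem.Dict Char Int)
      = PySem.Dict.mk (S1.map (fun c => (c, (1 : Int)))) := by
    have := pvFoldB1 L1 []
    simpa [PySem.Set.ofList_eq_foldl, hS1] using this
  -- B's second loop
  have hm2 := pvFoldB2 S1 L2 [] (fun _ => (1 : Int)) (by simp) (by intro c _; exact Or.inl rfl)
  rw [pvFoldAddIf] at hm2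
  simp only [List.map_nil, List.append_nil] at hm2
  -- the final items list of B's index
  set U2 : List Char := PySem.Set.ofList (L2.filter (fun c => !S1.contains c)) with hU2
  have hitems : (L2.foldl (fun d c => d.insert c (PySem.Int.bor (d.getD c 0) 2))
        (L1.foldl (fun d c => d.insert c (PySem.Int.bor (d.getD c 0) 1))
          (PySem.Dict.empty : PySem.Dict Char Int))).items
      = S1.map (fun c => (c, if L2.contains c then (3 : Int) else 1))
        ++ U2.map (fun c => (c, (2 : Int))) := by
    rw [hm1, hm2]
    rw [hU2, PySem.Set.ofList_eq_foldl]
  rw [hitems]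
  -- A's loops
  rw [pvFold2 (fun c => L2.contains c) L1 [] [],
    PySem.List.foldl_append_if (fun c => !L1.contains c) (fun c => c) L2 []]
  simp only [List.nil_append, List.map_id_fun', id]
  -- bucket equalities
  have hnd1 : S1.Nodup := PySem.Set.nodup_ofList L1
  have hndU2 : U2.Nodup := PySem.Set.nodup_ofList _
  have hfilt3 : ((S1.map (fun c => (c, if L2.contains c then (3 : Int) else 1))
        ++ U2.map (fun c => (c, (2 : Int)))).filter (fun p => p.2 == 3)).map (fun p => p.1)
      = S1.filter (fun c => L2.contains c) := by
    rw [List.filter_append, List.filter_map, List.filter_map]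
    have h1 : S1.filter ((fun p => p.2 == 3) ∘ fun c => (c, if L2.contains c then (3 : Int) else 1))
        = S1.filter (fun c => L2.contains c) := by
      refine List.filter_congr ?_
      intro c _
      by_cases h : c ∈ L2 <;> simp [h]
    have h2 : U2.filter ((fun p => p.2 == 3) ∘ fun c => (c, (2 : Int))) = [] := by
      simp [List.filter_eq_nil_iff]
    rw [h1, h2]
    simp [Function.comp_def]
  have hfilt1 : ((S1.map (fun c => (c, if L2.contains c then (3 : Int) else 1))
        ++ U2.map (fun c => (c, (2 : Int)))).filter (fun p => p.2 == 1)).map (fun p => p.1)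
      = S1.filter (fun c => !L2.contains c) := by
    rw [List.filter_append, List.filter_map, List.filter_map]
    have h1 : S1.filter ((fun p => p.2 == 1) ∘ fun c => (c, if L2.contains c then (3 : Int) else 1))
        = S1.filter (fun c => !L2.contains c) := by
      refine List.filter_congr ?_
      intro c _
      by_cases h : c ∈ L2 <;> simp [h]
    have h2 : U2.filter ((fun p => p.2 == 1) ∘ fun c => (c, (2 : Int))) = [] := by
      simp [List.filter_eq_nil_iff]
    rw [h1, h2]
    simp [Function.comp_def]
  have hfilt2 : ((S1.map (fun c => (c, if L2.contains c then (3 : Int) else 1))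
        ++ U2.map (fun c => (c, (2 : Int)))).filter (fun p => p.2 == 2)).map (fun p => p.1)
      = U2 := by
    rw [List.filter_append, List.filter_map, List.filter_map]
    have h1 : S1.filter ((fun p => p.2 == 2) ∘ fun c => (c, if L2.contains c then (3 : Int) else 1)) = [] := by
      rw [List.filter_eq_nil_iff]
      intro c _
      by_cases h : c ∈ L2 <;> simp [h]
    have h2 : U2.filter ((fun p => p.2 == 2) ∘ fun c => (c, (2 : Int))) = U2 := by
      simp [List.filter_eq_self]
    rw [h1, h2]
    simp [Function.comp_def]
  rw [hfilt3, hfilt1, hfilt2]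
  -- identify the three buckets with A's sets
  have e3 : PySem.Set.ofList (L1.filter (fun c => L2.contains c))
      = PySem.Set.ofList (S1.filter (fun c => L2.contains c)) := by
    rw [pvOfList_filter, pvOfList_filter, hS1, PySem.Set.ofList_ofList]
  have e1 : PySem.Set.ofList (L1.filter (fun c => !L2.contains c))
      = PySem.Set.ofList (S1.filter (fun c => !L2.contains c)) := by
    rw [pvOfList_filter, pvOfList_filter, hS1, PySem.Set.ofList_ofList]
  have e2 : PySem.Set.ofList (L2.filter (fun c => !L1.contains c)) = PySem.Set.ofList U2 := by
    rw [hU2, PySem.Set.ofList_ofList]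
    refine congrArg _ (List.filter_congr ?_)
    intro c _
    have hmem : S1.contains c = L1.contains c := by
      by_cases h : c ∈ L1
      · simp [h, (PySem.Set.mem_ofList _ _).mpr h, hS1]
      · have h' : c ∉ S1 := fun hc => h ((PySem.Set.mem_ofList _ _).mp (hS1 ▸ hc))
        simp [h, h']
    rw [hmem]
  rw [e3, e1, e2]
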